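-- pv_equiv track=rewrite | github.com/thaisribeiro/text_summarizer_api | src/api/services/summarization_service.py | handle_sentences
-- ===== SOURCE A (Python) =====
-- def handle_sentences(frequences_word, sentences):
--     frequences_sentence = dict()
--     for sentence in sentences:
--         for word, freq in frequences_word.items():
--             if word in sentence:
--                 if sentence in frequences_sentence:
--                     frequences_sentence[sentence] += freq
--                 else:
--                     frequences_sentence[sentence] = freq
--
--     return frequences_sentence
-- ===== SOURCE B (Python) =====
-- def handle_sentences(frequences_word, sentences):
--     counts = {}
--     for s in sentences:
--         counts[s] = counts.get(s, 0) + 1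
--     result = {}
--     for sentence in counts:
--         matched = [freq for word, freq in frequences_word.items() if word in sentence]
--         if matched:
--             result[sentence] = sum(matched) * counts[sentence]
--     return result
-- ===== Notes on version B (the rewrite author's own statement) =====
-- stated objective: alternative
-- what changed: Instead of A's per-occurrence nested loop that mutates the result dict word by word, B first counts sentence multiplicities in one pass, then for each distinct sentence computes the matched-frequency sum once and multiplies it by the multiplicity.
import Mathlib
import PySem

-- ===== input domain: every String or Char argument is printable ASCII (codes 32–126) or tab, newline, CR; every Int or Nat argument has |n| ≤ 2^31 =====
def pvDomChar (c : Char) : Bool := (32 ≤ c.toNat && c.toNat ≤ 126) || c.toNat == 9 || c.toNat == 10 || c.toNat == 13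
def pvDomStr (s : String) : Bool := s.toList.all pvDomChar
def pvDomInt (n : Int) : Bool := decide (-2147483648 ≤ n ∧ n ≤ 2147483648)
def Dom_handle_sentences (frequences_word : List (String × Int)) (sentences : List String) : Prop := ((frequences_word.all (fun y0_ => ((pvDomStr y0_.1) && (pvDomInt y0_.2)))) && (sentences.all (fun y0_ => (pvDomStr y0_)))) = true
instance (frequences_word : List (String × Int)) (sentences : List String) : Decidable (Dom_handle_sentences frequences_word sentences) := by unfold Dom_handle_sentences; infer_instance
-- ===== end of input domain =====

-- B replaces A's per-occurrence accumulation by one counting pass over the sentences plus a single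
-- matched-frequency sum per distinct sentence, multiplied by its multiplicity (alternative decomposition).


-- ===== PORT A =====
def handle_sentences (frequences_word : List (String × Int)) (sentences : List String) : List (String × Int) :=
  let items := (PySem.Dict.ofList frequences_word).items
  let frequences_sentence : PySem.Dict String Int :=
    sentences.foldl (fun fs sentence =>
      items.foldl (fun fs wf =>
        if PySem.Str.isIn wf.1 sentence then
          if fs.contains sentence then
            fs.insert sentence (fs.getD sentence 0 + wf.2)
          else
            fs.insert sentence wf.2
        else fs) fs) PySem.Dict.empty
  frequences_sentence.items

-- ===== PORT B =====
def handle_sentences_alt (frequences_word : List (String × Int)) (sentences : List String) : List (String × Int) :=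
  let counts : PySem.Dict String Int :=
    sentences.foldl (fun d s => d.insert s (d.getD s 0 + 1)) PySem.Dict.empty
  let items := (PySem.Dict.ofList frequences_word).items
  let result : PySem.Dict String Int :=
    counts.keys.foldl (fun r sentence =>
      let matched := (items.filter (fun wf => PySem.Str.isIn wf.1 sentence)).map (·.2)
      if matched ≠ [] then r.insert sentence (matched.sum * counts.getD sentence 0) else r)
      PySem.Dict.empty
  result.items

-- ===== PRECONDITION & SPEC =====
def Spec_handle_sentences (frequences_word : List (String × Int)) (sentences : List String) (out : List (String × Int)) : Prop := out = handle_sentences_alt frequences_word sentences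
instance (frequences_word : List (String × Int)) (sentences : List String) (out : List (String × Int)) : Decidable (Spec_handle_sentences frequences_word sentences out) := by unfold Spec_handle_sentences; infer_instance

-- ===== CLAIM (what is proved, stated in full; the proofs are below) =====
def Claim_equal_handle_sentences : Prop := ∀ (frequences_word : List (String × Int)) (sentences : List String), Dom_handle_sentences frequences_word sentences → Spec_handle_sentences frequences_word sentences (handle_sentences frequences_word sentences)

-- ===== LEMMAS AND PROOFS =====
-- matched-frequency sum of a word list over a sentence, and "some word matches"
def pvTotal (ws : List (String × Int)) (s : String) : Int :=
  ((ws.filter (fun wf => PySem.Str.isIn wf.1 s)).map (·.2)).sum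

def pvHasM (ws : List (String × Int)) (s : String) : Bool :=
  decide ((ws.filter (fun wf => PySem.Str.isIn wf.1 s)).map (·.2) ≠ [])

theorem pv_inner (ws : List (String × Int)) (s : String) (d : PySem.Dict String Int) :
    ws.foldl (fun fs wf =>
      if PySem.Str.isIn wf.1 s then
        if fs.contains s then fs.insert s (fs.getD s 0 + wf.2) else fs.insert s wf.2
      else fs) d
    = if pvHasM ws s then d.insert s (d.getD s 0 + pvTotal ws s) else d := by
  induction ws generalizing d with
  | nil => simp [pvHasM]
  | cons wf rest ih =>
    rw [List.foldl_cons, ih]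
    by_cases h : PySem.Str.isIn wf.1 s = true
    · have hd : (if PySem.Str.isIn wf.1 s = true then
          (if d.contains s = true then d.insert s (d.getD s 0 + wf.2) else d.insert s wf.2) else d)
          = d.insert s (d.getD s 0 + wf.2) := by
        rw [if_pos h]
        by_cases hc : d.contains s = true
        · rw [if_pos hc]
        · simp only [Bool.not_eq_true] at hc
          rw [if_neg (by simp [hc]), PySem.Dict.getD_of_not_contains (h := hc), zero_add]
      have h' : PySem.Chars.isIn wf.1.toList s.toList = true := by simpa using h
      have hHM : pvHasM (wf :: rest) s = true := by simp [pvHasM, h']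
      have hT : pvTotal (wf :: rest) s = wf.2 + pvTotal rest s := by
        simp [pvTotal, h']
      rw [hd, hHM, if_pos rfl, hT]
      by_cases hr : pvHasM rest s = true
      · rw [if_pos hr, PySem.Dict.getD_insert_self, PySem.Dict.insert_insert_self, add_assoc]
      · rw [if_neg hr]
        have ht : pvTotal rest s = 0 := by
          have h0 : (rest.filter (fun wf => PySem.Str.isIn wf.1 s)).map (·.2) = [] := by
            simpa [pvHasM] using hr
          unfold pvTotal
          rw [h0]; rfl
        rw [ht, add_zero]
    · simp only [Bool.not_eq_true] at h
      have h' : PySem.Chars.isIn wf.1.toList s.toList = false := by simpa using h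
      have hd : (if PySem.Str.isIn wf.1 s = true then
          (if d.contains s = true then d.insert s (d.getD s 0 + wf.2) else d.insert s wf.2) else d)
          = d := by rw [if_neg (by simp [h'])]
      have hHM : pvHasM (wf :: rest) s = pvHasM rest s := by simp [pvHasM, h']
      have hT : pvTotal (wf :: rest) s = pvTotal rest s := by simp [pvTotal, h']
      rw [hd, hHM, hT]

theorem pv_wfold_getD (t : String → Int) (m : List String) (d : PySem.Dict String Int) (v : String) :
    (m.foldl (fun d s => d.insert s (d.getD s 0 + t s)) d).getD v 0
      = d.getD v 0 + (m.count v : Int) * t v := by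
  induction m generalizing d with
  | nil => simp
  | cons s rest ih =>
    rw [List.foldl_cons, ih, PySem.Dict.getD_insert]
    by_cases hv : v = s
    · subst hv; simp; ring_nf
    · rw [if_neg hv]
      have hv' : ¬ s = v := fun h => hv h.symm
      have hcnt : (s :: rest).count v = rest.count v := by simp [hv']
      rw [hcnt]

theorem pv_wfold_items (t : String → Int) (m : List String) :
    ((m.foldl (fun d s => d.insert s (d.getD s 0 + t s)) (PySem.Dict.empty : PySem.Dict String Int)).items)
      = (PySem.Set.ofList m).map (fun s => (s, (m.count s : Int) * t s)) := by
  induction m using List.reverseRecOn with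
  | nil => rfl
  | append_singleton m x ih =>
    rw [List.foldl_append, List.foldl_cons, List.foldl_nil]
    have hkeys : (m.foldl (fun d s => d.insert s (d.getD s 0 + t s)) (PySem.Dict.empty : PySem.Dict String Int)).keys
        = PySem.Set.ofList m := by
      rw [PySem.Dict.keys_foldl_insert]
      simp [PySem.Set.update_nil_left, PySem.Dict.keys_empty]
    have hg : (m.foldl (fun d s => d.insert s (d.getD s 0 + t s)) (PySem.Dict.empty : PySem.Dict String Int)).getD x 0
        = (m.count x : Int) * t x := by
      rw [pv_wfold_getD]; simp
    by_cases hx : x ∈ m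
    · have hc : (m.foldl (fun d s => d.insert s (d.getD s 0 + t s)) (PySem.Dict.empty : PySem.Dict String Int)).contains x = true := by
        rw [PySem.Dict.contains_iff_mem_keys, hkeys]
        exact (PySem.Set.mem_ofList _ _).2 hx
      rw [PySem.Dict.items_insert_of_contains _ _ hc, ih, List.map_map,
        PySem.Set.ofList_append_singleton, PySem.Set.add_of_mem ((PySem.Set.mem_ofList _ _).2 hx)]
      apply List.map_congr_left
      intro a ha
      by_cases hax : a = x
      · subst hax
        simp only [Function.comp_apply, beq_self_eq_true, if_pos]
        rw [hg]
        have hcnt : (m ++ [a]).count a = m.count a + 1 := by simp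
        rw [hcnt]; push_cast; ring_nf
      · simp only [Function.comp_apply]
        rw [if_neg (by simpa using hax)]
        have hcnt : (m ++ [x]).count a = m.count a := by
          have h0 : List.count a [x] = 0 := List.count_eq_zero.2 (by simp [hax])
          simp [List.count_append, h0]
        rw [hcnt]
    · have hc : (m.foldl (fun d s => d.insert s (d.getD s 0 + t s)) (PySem.Dict.empty : PySem.Dict String Int)).contains x = false := by
        rw [← Bool.not_eq_true, PySem.Dict.contains_iff_mem_keys, hkeys]
        simpa [PySem.Set.mem_ofList] using hx
      rw [PySem.Dict.items_insert_of_not_contains _ _ hc, ih,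
        PySem.Set.ofList_append_singleton, PySem.Set.add_of_not_mem (by simpa [PySem.Set.mem_ofList] using hx),
        List.map_append]
      congr 1
      · apply List.map_congr_left
        intro a ha
        have hax : a ≠ x := by rintro rfl; exact hx ((PySem.Set.mem_ofList _ _).1 ha)
        have hcnt : (m ++ [x]).count a = m.count a := by
          have h0 : List.count a [x] = 0 := List.count_eq_zero.2 (by simp [hax])
          simp [List.count_append, h0]
        rw [hcnt]
      · rw [hg]
        have h0 : m.count x = 0 := List.count_eq_zero.2 hx
        simp [h0]

theorem pv_ofList_filter (l : List String) (p : String → Bool) :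
    PySem.Set.ofList (l.filter p) = (PySem.Set.ofList l).filter p := by
  induction l using List.reverseRecOn with
  | nil => rfl
  | append_singleton l x ih =>
    rw [List.filter_append, PySem.Set.ofList_append_singleton]
    by_cases hp : p x = true
    · have h1 : List.filter p [x] = [x] := by simp [hp]
      rw [h1, PySem.Set.ofList_append_singleton, ih]
      by_cases hx : x ∈ l
      · have hx1 : x ∈ PySem.Set.ofList l := (PySem.Set.mem_ofList _ _).2 hx
        have hx2 : x ∈ (PySem.Set.ofList l).filter p := List.mem_filter.2 ⟨hx1, hp⟩
        rw [PySem.Set.add_of_mem hx2, PySem.Set.add_of_mem hx1]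
      · have hx1 : x ∉ PySem.Set.ofList l := by simpa [PySem.Set.mem_ofList] using hx
        have hx2 : x ∉ (PySem.Set.ofList l).filter p := fun hm => hx1 (List.mem_filter.1 hm).1
        rw [PySem.Set.add_of_not_mem hx2, PySem.Set.add_of_not_mem hx1, List.filter_append, h1]
    · have h1 : List.filter p [x] = [] := by simp [hp]
      rw [h1, List.append_nil, ih]
      by_cases hx : x ∈ l
      · have hx1 : x ∈ PySem.Set.ofList l := (PySem.Set.mem_ofList _ _).2 hx
        rw [PySem.Set.add_of_mem hx1]
      · have hx1 : x ∉ PySem.Set.ofList l := by simpa [PySem.Set.mem_ofList] using hx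
        rw [PySem.Set.add_of_not_mem hx1, List.filter_append, h1, List.append_nil]

-- the whole equality, as a plain lemma
theorem pv_main (fw : List (String × Int)) (sentences : List String) :
    handle_sentences fw sentences = handle_sentences_alt fw sentences := by
  simp only [handle_sentences, handle_sentences_alt]
  rw [PySem.Dict.foldl_insert_getD_add_one_eq_counter, PySem.Dict.keys_counter]
  set ws := (PySem.Dict.ofList fw).items with hws
  -- A side: inner fold in closed form, then as a filtered weighted fold
  rw [PySem.List.foldl_congr_mem sentences _
    (fun fs sentence => if pvHasM ws sentence then fs.insert sentence (fs.getD sentence 0 + pvTotal ws sentence) else fs)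
    PySem.Dict.empty (fun fs x _ => pv_inner ws x fs)]
  rw [← List.foldl_filter, pv_wfold_items (pvTotal ws) (sentences.filter (pvHasM ws)), pv_ofList_filter]
  -- B side: rewrite step, then as a filtered fresh-insert fold
  rw [PySem.List.foldl_congr_mem (PySem.Set.ofList sentences) _
    (fun r sentence => if pvHasM ws sentence then r.insert sentence (pvTotal ws sentence * ((PySem.Dict.counter sentences).getD sentence 0)) else r)
    PySem.Dict.empty ?_]
  · rw [← List.foldl_filter,
      PySem.Dict.items_foldl_insert_fresh _ (fun s => s)
        (fun s => pvTotal ws s * ((PySem.Dict.counter sentences).getD s 0)) PySem.Dict.empty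
        (fun a _ => PySem.Dict.contains_empty a)
        (by simpa using ((PySem.Set.nodup_ofList sentences).filter (pvHasM ws)))]
    simp only [show (PySem.Dict.empty : PySem.Dict String Int).items = [] from rfl, List.nil_append]
    apply List.map_congr_left
    intro s hs
    have hp : pvHasM ws s = true := (List.mem_filter.1 hs).2
    rw [List.count_filter hp, PySem.Dict.getD_counter, mul_comm]
  · intro r s _
    by_cases hm : (ws.filter (fun wf => PySem.Str.isIn wf.1 s)).map (·.2) = []
    · have h0 : ¬ (pvHasM ws s = true) := by
        unfold pvHasM
        simp only [decide_eq_true_eq, ne_eq, Decidable.not_not]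
        exact hm
      beta_reduce
      rw [if_neg (not_not_intro hm), if_neg h0]
    · have h1 : pvHasM ws s = true := by
        unfold pvHasM
        simp only [decide_eq_true_eq, ne_eq]
        exact hm
      beta_reduce
      rw [if_pos hm, if_pos h1]
      rfl

-- ===== VERDICT (by name: the statement is the Claim_ definition above) =====
theorem handle_sentences_spec : Claim_equal_handle_sentences := by
  intro frequences_word sentences _
  unfold Spec_handle_sentences
  exact pv_main frequences_word sentences
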